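-- pv_equiv track=rewrite | github.com/Amina74/Python-Programming-Intro | IntroPrograming/1DV501/ah224uq_assign2/notGraded/methods.py | has_XandY
-- ===== SOURCE A (Python) =====
-- def has_XandY(str):
--     x , y = False, False
--     for c in str:
--       if c == 'X' or c == 'x':
--           x = True
--       elif c == "Y" or c == 'y':
--           y = True
--     return x and y
-- ===== SOURCE B (Python) =====
-- def has_XandY(str):
--     return ('X' in str or 'x' in str) and ('Y' in str or 'y' in str)
-- ===== Notes on version B (the rewrite author's own statement) =====
-- stated objective: idiomatic
-- what changed: Replaced the single pass maintaining two boolean flags with a conjunction of membership tests (independent scans via the 'in' operator).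
import Mathlib
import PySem

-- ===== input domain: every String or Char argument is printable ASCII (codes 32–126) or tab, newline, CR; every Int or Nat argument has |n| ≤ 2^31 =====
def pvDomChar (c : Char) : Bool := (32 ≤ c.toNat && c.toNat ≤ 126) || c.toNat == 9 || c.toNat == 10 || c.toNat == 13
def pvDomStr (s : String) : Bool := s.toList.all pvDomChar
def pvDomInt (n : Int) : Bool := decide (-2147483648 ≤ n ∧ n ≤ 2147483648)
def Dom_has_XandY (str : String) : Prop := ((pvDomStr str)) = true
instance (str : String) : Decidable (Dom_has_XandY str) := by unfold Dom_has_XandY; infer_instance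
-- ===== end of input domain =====

-- B replaces A's one-pass loop with two boolean flags by a conjunction of membership tests (idiomatic; same cost).

-- ===== PORT A =====
-- literal port of A: fold over the characters carrying the (x, y) flag pair
def has_XandY (str : String) : Bool :=
  let st := str.toList.foldl (fun (p : Bool × Bool) c =>
    if c = 'X' ∨ c = 'x' then (true, p.2)
    else if c = 'Y' ∨ c = 'y' then (p.1, true)
    else p) (false, false)
  st.1 && st.2

-- ===== PORT B =====
-- literal port of B: ('X' in str or 'x' in str) and ('Y' in str or 'y' in str)
def has_XandY_alt (str : String) : Bool :=
  (PySem.Str.isIn "X" str || PySem.Str.isIn "x" str) &&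
  (PySem.Str.isIn "Y" str || PySem.Str.isIn "y" str)

-- ===== PRECONDITION & SPEC =====
def Spec_has_XandY (str : String) (out : Bool) : Prop := out = has_XandY_alt str
instance (str : String) (out : Bool) : Decidable (Spec_has_XandY str out) := by unfold Spec_has_XandY; infer_instance

-- ===== CLAIM (what is proved, stated in full; the proofs are below) =====
def Claim_equal_has_XandY : Prop := ∀ (str : String), Dom_has_XandY str → Spec_has_XandY str (has_XandY str)

-- ===== LEMMAS AND PROOFS =====

theorem singleton_infix_iff_mem {a : Char} {l : List Char} : [a] <:+: l ↔ a ∈ l := by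
  constructor
  · intro h
    exact (List.singleton_sublist).1 h.sublist
  · intro h
    obtain ⟨s, t, h'⟩ := List.eq_append_cons_of_mem h
    exact ⟨s, t, by simp [h'.1]⟩

theorem isIn_single_iff {a : Char} {s : String} :
    PySem.Str.isIn (String.ofList [a]) s = s.toList.contains a := by
  by_cases h : a ∈ s.toList
  · have h1 : PySem.Str.isIn (String.ofList [a]) s = true := by
      rw [PySem.Str.isIn_iff_infix]
      simp [singleton_infix_iff_mem, h]
    simpa [h] using h1
  · have h1 : PySem.Str.isIn (String.ofList [a]) s = false := by
      rw [Bool.eq_false_iff, Ne, PySem.Str.isIn_iff_infix]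
      simp [singleton_infix_iff_mem, h]
    simpa [h] using h1

-- the loop invariant of A's fold: the flags are exactly the membership facts
theorem foldl_flags (l : List Char) (x y : Bool) :
    l.foldl (fun (p : Bool × Bool) c =>
      if c = 'X' ∨ c = 'x' then (true, p.2)
      else if c = 'Y' ∨ c = 'y' then (p.1, true)
      else p) (x, y)
    = (x || l.contains 'X' || l.contains 'x',
       y || l.contains 'Y' || l.contains 'y') := by
  induction l generalizing x y with
  | nil => simp
  | cons c t ih =>
    simp only [List.foldl_cons]
    split_ifs with h1 h2
    · rcases h1 with rfl | rfl <;> simp [ih]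
    · rcases h2 with rfl | rfl <;> simp [ih]
    · obtain ⟨n1, n2⟩ := not_or.mp h1
      obtain ⟨n3, n4⟩ := not_or.mp h2
      simp [ih, Ne.symm n1, Ne.symm n2, Ne.symm n3, Ne.symm n4]

-- ===== VERDICT (by name: the statement is the Claim_ definition above) =====
theorem has_XandY_spec : Claim_equal_has_XandY := by
  intro s _
  unfold Spec_has_XandY has_XandY has_XandY_alt
  have hX : "X" = String.ofList ['X'] := rfl
  have hx : "x" = String.ofList ['x'] := rfl
  have hY : "Y" = String.ofList ['Y'] := rfl
  have hy : "y" = String.ofList ['y'] := rfl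
  rw [hX, hx, hY, hy, isIn_single_iff, isIn_single_iff, isIn_single_iff, isIn_single_iff]
  simp [foldl_flags]
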